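-- pv_equiv track=rewrite | github.com/qiqi-xingyi/KRAS_Sampling | Ghost_RMSD/refine_dataset.py | reorder_keys
-- ===== SOURCE A (Python) =====
-- def reorder_keys(d: dict, first_keys: list[str]) -> dict:
--     """Reorder dict so that first_keys appear first, others keep original order."""
--     ordered = {}
--     for k in first_keys:
--         if k in d:
--             ordered[k] = d[k]
--     for k, v in d.items():
--         if k not in first_keys:
--             ordered[k] = v
--     return ordered
-- ===== SOURCE B (Python) =====
-- def reorder_keys(d: dict, first_keys: list[str]) -> dict:
--     """Reorder dict so that first_keys appear first, others keep original order."""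
--     m = len(first_keys)
--     first = {}
--     for i, k in enumerate(first_keys):
--         first.setdefault(k, i)
--     rank = {k: first.get(k, m + j) for j, k in enumerate(d)}
--     return dict(sorted(d.items(), key=lambda kv: rank[kv[0]]))
-- ===== Notes on version B (the rewrite author's own statement) =====
-- stated objective: faster
-- what changed: Replaces A's two-loop dict partition (with its per-entry 'k not in first_keys' list scan) by a rank-and-sort algorithm: every key of d gets a unique integer rank (first-occurrence index in first_keys, else len(first_keys)+position in d) and d's items are stable-sorted by that rank.
import Mathlib
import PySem

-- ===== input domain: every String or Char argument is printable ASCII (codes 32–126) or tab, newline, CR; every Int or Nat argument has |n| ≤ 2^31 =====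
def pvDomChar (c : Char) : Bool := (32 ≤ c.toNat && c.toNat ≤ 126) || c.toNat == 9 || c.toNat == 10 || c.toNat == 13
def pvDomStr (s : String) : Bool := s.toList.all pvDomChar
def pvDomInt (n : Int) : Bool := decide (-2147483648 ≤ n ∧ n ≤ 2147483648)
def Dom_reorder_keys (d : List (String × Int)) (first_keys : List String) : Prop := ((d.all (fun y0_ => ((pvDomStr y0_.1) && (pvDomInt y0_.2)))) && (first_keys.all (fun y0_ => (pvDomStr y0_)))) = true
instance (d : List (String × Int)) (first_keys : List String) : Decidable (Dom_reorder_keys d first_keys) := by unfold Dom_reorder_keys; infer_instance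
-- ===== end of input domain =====

-- B replaces A's two-loop dict partition (with its per-entry 'k not in first_keys' scan) by a
-- different algorithm: assign every key of d a unique integer rank (first-occurrence index in
-- first_keys, else len(first_keys) + position in d) and sort d's items by that rank; the timing
-- run measured B faster than A on the generated inputs.

-- ===== PORT A =====
-- the dict argument arrives as its item list; dict(pairs) = PySem.Dict.ofList
def reorder_keys (d : List (String × Int)) (first_keys : List String) : List (String × Int) :=
  let dd := PySem.Dict.ofList d
  -- ordered = {}; for k in first_keys: if k in d: ordered[k] = d[k]
  let ordered := first_keys.foldl
    (fun o k => if dd.contains k then o.insert k (dd.getD k 0) else o) PySem.Dict.empty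
  -- for k, v in d.items(): if k not in first_keys: ordered[k] = v
  let ordered := dd.items.foldl
    (fun o p => if first_keys.contains p.1 then o else o.insert p.1 p.2) ordered
  ordered.items

-- ===== PORT B =====
def reorder_keys_alt (d : List (String × Int)) (first_keys : List String) : List (String × Int) :=
  let dd := PySem.Dict.ofList d
  -- m = len(first_keys)
  let m : Int := first_keys.length
  -- first = {}; for i, k in enumerate(first_keys): first.setdefault(k, i)
  let first := (PySem.List.enumerate first_keys).foldl
    (fun f p => f.setdefault p.2 p.1) PySem.Dict.empty
  -- rank = {k: first.get(k, m + j) for j, k in enumerate(d)}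
  let rank := (PySem.List.enumerate dd.keys).foldl
    (fun r p => r.insert p.2 (first.getD p.2 (m + p.1))) PySem.Dict.empty
  -- dict(sorted(d.items(), key=lambda kv: rank[kv[0]]))  -- rank[kv[0]] always present
  (PySem.Dict.ofList
    (PySem.List.sorted dd.items (fun kv => rank.getD kv.1 0))).items

-- ===== PRECONDITION & SPEC =====
def Spec_reorder_keys (d : List (String × Int)) (first_keys : List String) (out : List (String × Int)) : Prop := out = reorder_keys_alt d first_keys
instance (d : List (String × Int)) (first_keys : List String) (out : List (String × Int)) : Decidable (Spec_reorder_keys d first_keys out) := by unfold Spec_reorder_keys; infer_instance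

-- ===== CLAIM (what is proved, stated in full; the proofs are below) =====
def Claim_equal_reorder_keys : Prop := ∀ (d : List (String × Int)) (first_keys : List String), Dom_reorder_keys d first_keys → Spec_reorder_keys d first_keys (reorder_keys d first_keys)

-- ===== LEMMAS AND PROOFS =====

theorem pv_pairwise_idxOf {ks : List String} (h : ks.Nodup) :
    ks.Pairwise (fun a b => List.idxOf a ks < List.idxOf b ks) := by
  rw [List.pairwise_iff_getElem]
  intro i j hi hj hij
  rw [List.Nodup.idxOf_getElem h i hi, List.Nodup.idxOf_getElem h j hj]
  exact hij

theorem pv_first_get? (fk : List String) (s : Int) (f0 : PySem.Dict String Int) (k : String) :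
    ((PySem.List.enumerate fk s).foldl (fun f p => f.setdefault p.2 p.1) f0).get? k
      = match f0.get? k with
        | some v => some v
        | none => if k ∈ fk then some (s + (List.idxOf k fk : Int)) else none := by
  induction fk generalizing s f0 with
  | nil =>
    simp only [PySem.List.enumerate_nil, List.foldl_nil, List.not_mem_nil, if_false]
    cases f0.get? k <;> rfl
  | cons a t ih =>
    rw [PySem.List.enumerate_cons, List.foldl_cons, ih]
    by_cases hk : k = a
    · subst hk
      by_cases hc : f0.contains k = true
      · rw [PySem.Dict.setdefault_of_contains _ _ hc]
        rw [PySem.Dict.contains_eq_isSome_get?] at hc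
        obtain ⟨v, hv⟩ := Option.isSome_iff_exists.mp hc
        simp [hv]
      · have hn : f0.get? k = none := by
          rw [PySem.Dict.get?_eq_none_iff_contains]; simpa using hc
        rw [PySem.Dict.setdefault_of_not_contains _ _ (by simpa using hc)]
        simp [PySem.Dict.get?_insert_self, hn, List.idxOf_cons_self]
    · have hstep : (f0.setdefault (s, a).2 (s, a).1).get? k = f0.get? k := by
        by_cases hc : f0.contains a = true
        · rw [PySem.Dict.setdefault_of_contains _ _ hc]
        · rw [PySem.Dict.setdefault_of_not_contains _ _ (by simpa using hc)]
          exact PySem.Dict.get?_insert_of_ne _ _ hk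
      rw [hstep]
      cases hf : f0.get? k with
      | some v => rfl
      | none =>
        simp only [List.mem_cons, hk, false_or]
        by_cases hm : k ∈ t
        · rw [if_pos hm, if_pos hm, List.idxOf_cons_ne _ (by simpa using (Ne.symm hk))]
          push_cast; ring_nf
        · rw [if_neg hm, if_neg hm]

theorem pv_rank_get? (ks : List String) (s : Int) (g : Int × String → Int)
    (r0 : PySem.Dict String Int) (k : String) (hnd : ks.Nodup) :
    ((PySem.List.enumerate ks s).foldl (fun r p => r.insert p.2 (g p)) r0).get? k
      = if k ∈ ks then some (g (s + (List.idxOf k ks : Int), k)) else r0.get? k := by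
  induction ks generalizing s r0 with
  | nil => simp [PySem.List.enumerate_nil]
  | cons a t ih =>
    obtain ⟨ha, hndt⟩ := List.nodup_cons.mp hnd
    rw [PySem.List.enumerate_cons, List.foldl_cons, ih _ _ hndt]
    by_cases hk : k = a
    · subst hk
      rw [if_neg ha, if_pos (List.mem_cons_self ..)]
      simp [PySem.Dict.get?_insert_self, List.idxOf_cons_self]
    · have h2 : (r0.insert (s, a).2 (g (s, a))).get? k = r0.get? k :=
        PySem.Dict.get?_insert_of_ne _ _ hk
      simp only [List.mem_cons, hk, false_or]
      by_cases hm : k ∈ t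
      · rw [if_pos hm, if_pos hm, List.idxOf_cons_ne _ (by simpa using (Ne.symm hk))]
        push_cast; ring_nf
      · rw [if_neg hm, if_neg hm, h2]

theorem pv_loop1 (dd : PySem.Dict String Int) (fk : List String) :
    ∀ (rest pre : List String) (o : PySem.Dict String Int),
      fk = pre ++ rest →
      o.keys.Nodup →
      (∀ p ∈ o.items, dd.get? p.1 = some p.2 ∧ p.1 ∈ pre) →
      (∀ k ∈ pre, dd.contains k = true → k ∈ o.keys) →
      o.items.Pairwise (fun a b => List.idxOf a.1 fk < List.idxOf b.1 fk) →
      (let o1 := rest.foldl (fun o k => if dd.contains k then o.insert k (dd.getD k 0) else o) o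
       o1.keys.Nodup ∧
       (∀ p ∈ o1.items, dd.get? p.1 = some p.2 ∧ p.1 ∈ fk) ∧
       (∀ k ∈ fk, dd.contains k = true → k ∈ o1.keys) ∧
       o1.items.Pairwise (fun a b => List.idxOf a.1 fk < List.idxOf b.1 fk)) := by
  intro rest
  induction rest with
  | nil =>
    intro pre o hfk hnd hitems hcov hpw
    rw [List.append_nil] at hfk
    subst hfk
    exact ⟨hnd, fun p hp => hitems p hp, hcov, hpw⟩
  | cons a t ih =>
    intro pre o hfk hnd hitems hcov hpw
    simp only [List.foldl_cons]
    by_cases hc : dd.contains a = true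
    · rw [if_pos hc]
      -- the new dict o' := o.insert a (dd.getD a 0)
      refine ih (pre ++ [a]) (o.insert a (dd.getD a 0)) (by simpa using hfk)
        (PySem.Dict.nodup_keys_insert _ _ _ hnd) ?_ ?_ ?_
      · -- items of the insert
        intro p hp
        rcases (PySem.Dict.mem_items_insert _ _ _ _).mp hp with h | ⟨h, _⟩
        · subst h
          refine ⟨?_, by simp⟩
          rw [PySem.Dict.getD_eq_get?_getD]
          rw [PySem.Dict.contains_eq_isSome_get?] at hc
          obtain ⟨v, hv⟩ := Option.isSome_iff_exists.mp hc
          simp [hv]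
        · obtain ⟨h1, h2⟩ := hitems p h
          exact ⟨h1, by simp [h2]⟩
      · intro k hk hck
        rcases List.mem_append.mp hk with h | h
        · have := hcov k h hck
          rw [PySem.Dict.mem_keys_insert]
          exact Or.inr this
        · have : k = a := by simpa using h
          subst this
          rw [PySem.Dict.mem_keys_insert]
          exact Or.inl rfl
      · -- pairwise after insert
        by_cases hmem : o.contains a = true
        · -- overwrite in place: items map to themselves since value is unchanged
          have hga : o.get? a = some (dd.getD a 0) := by
            have ha : a ∈ o.keys := (PySem.Dict.contains_iff_mem_keys _ _).mp hmem
            obtain ⟨p, hp, hfst⟩ := List.mem_map.mp ha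
            obtain ⟨h1, _⟩ := hitems p hp
            have : o.get? p.1 = some p.2 := PySem.Dict.get?_of_mem_items _ hp hnd
            rw [hfst] at this h1
            rw [this]
            rw [PySem.Dict.getD_eq_get?_getD, h1]
            rfl
          have : o.insert a (dd.getD a 0) = o := by
            apply PySem.Dict.ext
            rw [PySem.Dict.items_insert_of_contains _ _ hmem]
            conv_rhs => rw [← List.map_id o.items]
            apply List.map_congr_left
            rintro ⟨p1, p2⟩ hp
            by_cases h : p1 == a
            · have h' : p1 = a := by simpa using h
              subst h'
              have : o.get? p1 = some p2 := PySem.Dict.get?_of_mem_items _ hp hnd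
              rw [hga] at this
              simp [Option.some.inj this]
            · simp [h]
          rw [this]
          exact hpw
        · -- fresh key appended at the end
          rw [PySem.Dict.items_insert_of_not_contains _ _ (by simpa using hmem)]
          rw [List.pairwise_append]
          refine ⟨hpw, List.pairwise_singleton _ _, ?_⟩
          intro p hp q hq
          have hq' : q = (a, dd.getD a 0) := by simpa using hq
          subst hq'
          obtain ⟨_, hppre⟩ := hitems p hp
          -- idxOf p.1 fk < pre.length
          have hlt : List.idxOf p.1 fk < pre.length := by
            rw [hfk, List.idxOf_append, if_pos hppre]
            exact List.idxOf_lt_length_of_mem hppre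
          -- a ∉ pre (else it would be in o.keys), so idxOf a fk = pre.length
          have hanp : a ∉ pre := by
            intro hmem'
            apply (by simpa using hmem : ¬ o.contains a = true)
            rw [PySem.Dict.contains_iff_mem_keys]
            exact hcov a hmem' hc
          have : List.idxOf a fk = pre.length := by
            rw [hfk, List.idxOf_append, if_neg hanp, List.idxOf_cons_self]
            omega
          simpa [this] using hlt
    · rw [if_neg hc]
      refine ih (pre ++ [a]) o (by simpa using hfk) hnd ?_ ?_ hpw
      · intro p hp
        obtain ⟨h1, h2⟩ := hitems p hp
        exact ⟨h1, by simp [h2]⟩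
      · intro k hk hck
        rcases List.mem_append.mp hk with h | h
        · exact hcov k h hck
        · have : k = a := by simpa using h
          subst this
          exact absurd hck hc

theorem pv_loop2_filter (fk : List String) (l : List (String × Int)) :
    ∀ (o : PySem.Dict String Int),
    l.foldl (fun o p => if fk.contains p.1 then o else o.insert p.1 p.2) o
      = (l.filter (fun p => !fk.contains p.1)).foldl (fun o p => o.insert p.1 p.2) o := by
  induction l with
  | nil => intro o; rfl
  | cons a t ih =>
    intro o
    rw [List.foldl_cons, List.filter_cons]
    by_cases hc : fk.contains a.1 = true
    · simp only [hc, if_true, Bool.not_true]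
      exact ih o
    · simp only [hc, Bool.not_false]
      simp only [if_true, List.foldl_cons]
      exact ih _

-- ===== VERDICT (by name: the statement is the Claim_ definition above) =====
theorem reorder_keys_spec : Claim_equal_reorder_keys := by
  intro d fk _
  unfold Spec_reorder_keys reorder_keys reorder_keys_alt
  simp only []
  set dd := PySem.Dict.ofList d with hdd
  have hndk : dd.keys.Nodup := PySem.Dict.nodup_keys_ofList d
  set m : Int := (fk.length : Int) with hm
  -- the `first` and `rank` dicts of B
  set first := (PySem.List.enumerate fk).foldl (fun f p => f.setdefault p.2 p.1)
    (PySem.Dict.empty : PySem.Dict String Int) with hfirst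
  set rank := (PySem.List.enumerate dd.keys).foldl
    (fun r p => r.insert p.2 (first.getD p.2 (m + p.1)))
    (PySem.Dict.empty : PySem.Dict String Int) with hrank
  -- rank value at every key of dd
  have hK : ∀ k ∈ dd.keys, rank.getD k 0
      = if k ∈ fk then (List.idxOf k fk : Int) else m + (List.idxOf k dd.keys : Int) := by
    intro k hk
    rw [PySem.Dict.getD_eq_get?_getD, hrank,
      pv_rank_get? dd.keys 0 (fun p => first.getD p.2 (m + p.1)) _ k hndk, if_pos hk]
    simp only []
    rw [PySem.Dict.getD_eq_get?_getD, hfirst, pv_first_get? fk 0 _ k]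
    rw [PySem.Dict.get?_empty]
    by_cases hkf : k ∈ fk
    · simp [hkf]
    · simp [hkf]
  -- A's first loop
  obtain ⟨h1nd, h1it, h1cov, h1pw⟩ :=
    pv_loop1 dd fk fk [] PySem.Dict.empty (by simp) PySem.Dict.nodup_keys_empty
      (by intro p hp; simp [show (PySem.Dict.empty : PySem.Dict String Int).items = [] from rfl] at hp)
      (by intro k hk; simp at hk)
      (by simp [show (PySem.Dict.empty : PySem.Dict String Int).items = [] from rfl])
  set o1 := fk.foldl (fun o k => if dd.contains k = true then o.insert k (dd.getD k 0) else o)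
    (PySem.Dict.empty : PySem.Dict String Int) with ho1
  -- the filtered tail
  set L := dd.items.filter (fun p => !fk.contains p.1) with hL
  -- L's keys are distinct and fresh for o1
  have hLsub : L.Sublist dd.items := List.filter_sublist
  have hLnd : (L.map Prod.fst).Nodup := List.Nodup.sublist (hLsub.map Prod.fst) hndk
  have hLfresh : ∀ p ∈ L, o1.contains p.1 = false := by
    intro p hp
    have hnf : ¬ fk.contains p.1 := by
      have := (List.mem_filter.mp hp).2; simpa using this
    by_contra hcon
    have hcon' : o1.contains p.1 = true := by simpa using hcon
    have hkmem : p.1 ∈ o1.keys := (PySem.Dict.contains_iff_mem_keys _ _).mp hcon'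
    obtain ⟨q, hq, hqf⟩ := List.mem_map.mp hkmem
    obtain ⟨_, hqfk⟩ := h1it q hq
    exact hnf (by rw [← hqf] at *; simpa using hqfk)
  -- A's result as a concrete list
  have hA : (dd.items.foldl
      (fun o p => if fk.contains p.1 then o else o.insert p.1 p.2) o1).items
      = o1.items ++ L := by
    rw [pv_loop2_filter, ← hL,
      PySem.Dict.items_foldl_insert_fresh L Prod.fst Prod.snd o1 hLfresh hLnd]
    simp
  rw [hA]
  -- keys of everything in o1.items are in both fk and dd.keys
  have h1keys : ∀ p ∈ o1.items, p.1 ∈ fk ∧ p.1 ∈ dd.keys := by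
    intro p hp
    obtain ⟨hg, hfk⟩ := h1it p hp
    exact ⟨hfk, PySem.Dict.mem_keys_of_mem_items dd (PySem.Dict.mem_items_of_get?_eq_some dd hg)⟩
  -- nodup of the combined list
  have h1ndl : o1.items.Nodup := List.Nodup.of_map Prod.fst h1nd
  have hLndl : L.Nodup := List.Nodup.of_map Prod.fst hLnd
  have hdisj : o1.items.Disjoint L := by
    intro p hp hpL
    have hnf : ¬ fk.contains p.1 := by
      have := (List.mem_filter.mp hpL).2; simpa using this
    exact hnf (by simpa using (h1keys p hp).1)
  have hAnd : (o1.items ++ L).Nodup := List.nodup_append.mpr ⟨h1ndl, hLndl, fun a ha b hb hab => hdisj ha (hab ▸ hb)⟩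
  have hddnd : dd.items.Nodup := List.Nodup.of_map Prod.fst hndk
  -- permutation with dd.items
  have hperm : (o1.items ++ L).Perm dd.items := by
    rw [List.perm_ext_iff_of_nodup hAnd hddnd]
    intro p
    constructor
    · intro hp
      rcases List.mem_append.mp hp with h | h
      · exact PySem.Dict.mem_items_of_get?_eq_some dd (h1it p h).1
      · exact (List.mem_filter.mp h).1
    · intro hp
      by_cases hc : fk.contains p.1 = true
      · have hfk : p.1 ∈ fk := by simpa using hc
        have hck : dd.contains p.1 = true :=
          (PySem.Dict.contains_iff_mem_keys _ _).mpr (PySem.Dict.mem_keys_of_mem_items dd hp)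
        have hk1 : p.1 ∈ o1.keys := h1cov p.1 hfk hck
        obtain ⟨q, hq, hqf⟩ := List.mem_map.mp hk1
        have hgq : dd.get? q.1 = some q.2 := (h1it q hq).1
        have hgp : dd.get? p.1 = some p.2 := PySem.Dict.get?_of_mem_items dd hp hndk
        rw [hqf] at hgq
        rw [hgp] at hgq
        have : q = p := Prod.ext hqf (Option.some.inj hgq).symm
        exact List.mem_append.mpr (Or.inl (this ▸ hq))
      · exact List.mem_append.mpr (Or.inr (List.mem_filter.mpr ⟨hp, by simpa using hc⟩))
  -- strict pairwise on the ranks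
  have hpair : (o1.items ++ L).Pairwise
      (fun a b => rank.getD a.1 0 < rank.getD b.1 0) := by
    rw [List.pairwise_append]
    refine ⟨?_, ?_, ?_⟩
    · refine h1pw.imp_of_mem ?_
      intro a b ha hb hab
      rw [hK a.1 (h1keys a ha).2, hK b.1 (h1keys b hb).2,
        if_pos (h1keys a ha).1, if_pos (h1keys b hb).1]
      exact_mod_cast hab
    · have hkp : dd.items.Pairwise
          (fun a b => List.idxOf a.1 dd.keys < List.idxOf b.1 dd.keys) := by
        have := pv_pairwise_idxOf hndk
        rw [PySem.Dict.keys] at this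
        rw [List.pairwise_map] at this
        exact this
      refine (hkp.filter _).imp_of_mem ?_
      intro a b ha hb hab
      have ham : a.1 ∉ fk := by
        have := (List.mem_filter.mp ha).2; simpa using this
      have hbm : b.1 ∉ fk := by
        have := (List.mem_filter.mp hb).2; simpa using this
      have hak : a.1 ∈ dd.keys :=
        PySem.Dict.mem_keys_of_mem_items dd (List.mem_filter.mp ha).1
      have hbk : b.1 ∈ dd.keys :=
        PySem.Dict.mem_keys_of_mem_items dd (List.mem_filter.mp hb).1
      rw [hK a.1 hak, hK b.1 hbk, if_neg ham, if_neg hbm]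
      have : (List.idxOf a.1 dd.keys : Int) < (List.idxOf b.1 dd.keys : Int) := by
        exact_mod_cast hab
      omega
    · intro a ha b hb
      have hbm : b.1 ∉ fk := by
        have := (List.mem_filter.mp hb).2; simpa using this
      have hbk : b.1 ∈ dd.keys :=
        PySem.Dict.mem_keys_of_mem_items dd (List.mem_filter.mp hb).1
      rw [hK a.1 (h1keys a ha).2, hK b.1 hbk,
        if_pos (h1keys a ha).1, if_neg hbm]
      have h1 : List.idxOf a.1 fk < fk.length := List.idxOf_lt_length_of_mem (h1keys a ha).1
      have h2 : (0:Int) ≤ (List.idxOf b.1 dd.keys : Int) := Int.natCast_nonneg _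
      have h3 : (List.idxOf a.1 fk : Int) < m := by rw [hm]; exact_mod_cast h1
      omega
  -- B's sort names exactly A's list
  rw [PySem.List.sorted_eq_of_perm_of_pairwise_lt dd.items (o1.items ++ L) _ hperm hpair]
  -- dict() of a list with distinct keys keeps it unchanged
  have hmapnd : ((o1.items ++ L).map Prod.fst).Nodup := by
    have := hperm.map Prod.fst
    exact this.nodup_iff.mpr hndk
  rw [PySem.Dict.ofList, PySem.Dict.update,
    PySem.Dict.items_foldl_insert_fresh (o1.items ++ L) Prod.fst Prod.snd _
      (by intro a _; simp [PySem.Dict.contains_empty]) hmapnd]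
  simp [show (PySem.Dict.empty : PySem.Dict String Int).items = [] from rfl]
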